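-- pv_equiv track=rewrite | github.com/Plastonick/project-euler | 770.py | get_ev_2
-- ===== SOURCE A (Python) =====
-- evs2 = {}
--
-- def get_ev_2(n_takes, n_gives):
--     if n_takes == 0:
--         return (2 ** n_gives, 1)
--
--     if n_gives == 0:
--         return (1, 1)
--
--     address = (n_takes, n_gives)
--     if address not in evs2:
--         y = get_ev_2(n_takes - 1, n_gives)
--         z = get_ev_2(n_takes, n_gives - 1)
--
--         y0 = y[0]
--         y1 = y[1]
--         z0 = z[0]
--         z1 = z[1]
--
--         # let the bet amount be x, then consider player B
--         # either takes or gives. If B takes, then we need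
--         # the expected value given that situation (y),
--         # similarly for the situation in which B gives (z).
--         # so our ev before we know what B does is:
--         # y * (1 - x) = z * (1 + x)
--         # which re-arranges to give the below equation for
--         # our optimal bet amount.
--         # Since both are linear, and one has a positive and
--         # one a negative gradient, we know their
--         # intersection gives us our maximum-minimum.
--         # bn = y[0]*z[1] - z[0]*y[1]
--         # bd = y[0]*z[1] + z[0]*y[1]
--
--         n = 2 * y0 * z0
--         d = (y0 * z1) + (y1 * z0)
--
--         evs2[address] = (n, d)
--
--     return evs2[address]
-- ===== SOURCE B (Python) =====
-- def get_ev_2(n_takes, n_gives):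
--     if n_takes == 0:
--         return (2 ** n_gives, 1)
--     if n_gives == 0:
--         return (1, 1)
--     # bottom-up DP over rows t = 0 .. n_takes, each row indexed by g = 0 .. n_gives
--     row = [(2 ** g, 1) for g in range(n_gives + 1)]  # row t = 0
--     for _ in range(n_takes):
--         new = [(1, 1)]
--         for g in range(1, n_gives + 1):
--             y0, y1 = row[g]        # cell (t - 1, g)
--             z0, z1 = new[g - 1]    # cell (t, g - 1)
--             new.append((2 * y0 * z0, y0 * z1 + y1 * z0))
--         row = new
--     return row[n_gives]
-- ===== Notes on version B (the rewrite author's own statement) =====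
-- stated objective: alternative
-- what changed: Replaced A's memoized top-down recursion (global dict evs2) by an iterative bottom-up DP that fills the (takes, gives) grid row by row, keeping only one rolling row.
-- outside the precondition, e.g. on get_ev_2(0, -1): A returns (0.5, 1), B returns (0.5, 1)
import Mathlib
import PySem

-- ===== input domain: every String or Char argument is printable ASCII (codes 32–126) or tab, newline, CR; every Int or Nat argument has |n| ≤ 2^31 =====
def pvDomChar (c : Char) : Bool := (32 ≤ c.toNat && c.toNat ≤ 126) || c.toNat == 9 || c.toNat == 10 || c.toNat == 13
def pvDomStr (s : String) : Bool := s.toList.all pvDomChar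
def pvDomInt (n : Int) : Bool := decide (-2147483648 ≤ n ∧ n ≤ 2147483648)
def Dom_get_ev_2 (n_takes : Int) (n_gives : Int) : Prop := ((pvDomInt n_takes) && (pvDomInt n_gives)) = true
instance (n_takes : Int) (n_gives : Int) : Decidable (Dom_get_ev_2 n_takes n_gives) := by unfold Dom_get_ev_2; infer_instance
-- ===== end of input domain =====

-- B replaces A's memoized top-down recursion by an iterative bottom-up DP over rows of the
-- (takes, gives) grid (objective: alternative decomposition; A also mutates a module-level memo
-- dict `evs2`, which B does not — only the return value is claimed equal).

-- ===== PORT A =====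
-- A's recursion, with its global memo dict threaded through explicitly.
-- The `((0, 0), m)` branch is a totalization guard only: Python recurses forever there
-- (a negative argument next to a nonzero one), outside Pre_.
def goA (t g : Int) (m : PySem.Dict (Int × Int) (Int × Int)) :
    (Int × Int) × PySem.Dict (Int × Int) (Int × Int) :=
  if _ht0 : t = 0 then ((if 0 ≤ g then (2 : Int) ^ g.toNat else 0, 1), m)
  else if _hg0 : g = 0 then ((1, 1), m)
  else if _hneg : t < 0 ∨ g < 0 then ((0, 0), m)
  else
    match m.get? (t, g) with
    | some v => (v, m)
    | none =>
      let py := goA (t - 1) g m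
      let pz := goA t (g - 1) py.2
      let n := 2 * py.1.1 * pz.1.1
      let d := py.1.1 * pz.1.2 + py.1.2 * pz.1.1
      let m3 := pz.2.insert (t, g) (n, d)
      (m3.getD (t, g) (0, 0), m3)
termination_by (t.toNat + g.toNat)
decreasing_by
  · omega
  · omega

def get_ev_2 (n_takes : Int) (n_gives : Int) : Int × Int :=
  (goA n_takes n_gives PySem.Dict.empty).1

-- ===== PORT B =====
-- one row update: new = [(1,1)]; for g in range(1, gTot+1) append the combined cell
def stepRowB (row : List (Int × Int)) (gTot : Int) : List (Int × Int) :=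
  (PySem.List.pyRange 1 (gTot + 1) 1).foldl
    (fun new gi =>
      let y := PySem.List.pyGetD row gi (0, 0)
      let z := PySem.List.pyGetD new (gi - 1) (0, 0)
      new ++ [(2 * y.1 * z.1, y.1 * z.2 + y.2 * z.1)])
    [(1, 1)]

def get_ev_2_alt (n_takes : Int) (n_gives : Int) : Int × Int :=
  if n_takes = 0 then (if 0 ≤ n_gives then (2 : Int) ^ n_gives.toNat else 0, 1)
  else if n_gives = 0 then (1, 1)
  else
    let row0 := (PySem.List.pyRange 0 (n_gives + 1) 1).map
      (fun j => ((if 0 ≤ j then (2 : Int) ^ j.toNat else 0), (1 : Int)))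
    let fin := (List.range n_takes.toNat).foldl (fun r _ => stepRowB r n_gives) row0
    PySem.List.pyGetD fin n_gives (0, 0)

-- ===== PRECONDITION & SPEC =====
-- Pre_ excludes inputs where Python A does not return an Int pair: with n_takes = 0 and
-- n_gives < 0 it returns a float (2**n_gives), and with a negative argument next to a
-- nonzero one it recurses without reaching a base case (RecursionError).
def Pre_get_ev_2 (n_takes : Int) (n_gives : Int) : Prop :=
  n_gives = 0 ∨ (0 ≤ n_takes ∧ 0 ≤ n_gives)
instance (n_takes : Int) (n_gives : Int) : Decidable (Pre_get_ev_2 n_takes n_gives) := by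
  unfold Pre_get_ev_2; infer_instance

def pvWitness_get_ev_2 : Int × Int := (3, 2)

def Spec_get_ev_2 (n_takes : Int) (n_gives : Int) (out : Int × Int) : Prop :=
  out = get_ev_2_alt n_takes n_gives
instance (n_takes : Int) (n_gives : Int) (out : Int × Int) :
    Decidable (Spec_get_ev_2 n_takes n_gives out) := by unfold Spec_get_ev_2; infer_instance

-- ===== CLAIM (what is proved, stated in full; the proofs are below) =====
def Claim_equal_get_ev_2 : Prop :=
  ∀ (n_takes : Int) (n_gives : Int), Dom_get_ev_2 n_takes n_gives →
    Pre_get_ev_2 n_takes n_gives → Spec_get_ev_2 n_takes n_gives (get_ev_2 n_takes n_gives)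

-- ===== LEMMAS AND PROOFS =====

-- the common mathematical recurrence both programs compute
def F : Nat → Nat → Int × Int
  | 0, g => ((2 : Int) ^ g, 1)
  | _ + 1, 0 => (1, 1)
  | t + 1, g + 1 =>
    let y := F t (g + 1)
    let z := F (t + 1) g
    (2 * y.1 * z.1, y.1 * z.2 + y.2 * z.1)

lemma F_zero (g : Nat) : F 0 g = ((2 : Int) ^ g, 1) := by cases g <;> simp [F]

lemma F_pos_zero (t : Nat) (ht : 0 < t) : F t 0 = (1, 1) := by
  cases t with
  | zero => omega
  | succ k => simp [F]

lemma F_succ_succ (t g : Nat) :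
    F (t + 1) (g + 1) =
      (2 * (F t (g + 1)).1 * (F (t + 1) g).1,
       (F t (g + 1)).1 * (F (t + 1) g).2 + (F t (g + 1)).2 * (F (t + 1) g).1) := by
  simp [F]

def InvA (m : PySem.Dict (Int × Int) (Int × Int)) : Prop :=
  ∀ t g v, m.get? (t, g) = some v → 0 < t ∧ 0 < g ∧ v = F t.toNat g.toNat

lemma goA_correct (t g : Int) (m : PySem.Dict (Int × Int) (Int × Int))
    (ht : 0 ≤ t) (hg : 0 ≤ g) (hm : InvA m) :
    (goA t g m).1 = F t.toNat g.toNat ∧ InvA (goA t g m).2 := by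
  rw [goA.eq_def]
  split_ifs with h1 h2 h3
  · subst h1
    refine ⟨?_, hm⟩
    simp [F_zero]
  · refine ⟨?_, hm⟩
    rw [h2]
    simp [F_pos_zero t.toNat (by omega)]
  · exact absurd h3 (by omega)
  · cases hget : m.get? (t, g) with
    | some v =>
      obtain ⟨_, _, hv⟩ := hm t g v hget
      exact ⟨hv, hm⟩
    | none =>
      obtain ⟨a, ha⟩ : ∃ a : Nat, t = (a : Int) + 1 := ⟨(t - 1).toNat, by omega⟩
      obtain ⟨b, hb⟩ : ∃ b : Nat, g = (b : Int) + 1 := ⟨(g - 1).toNat, by omega⟩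
      have hy := goA_correct (t - 1) g m (by omega) hg hm
      have hz := goA_correct t (g - 1) (goA (t - 1) g m).2 ht (by omega) hy.2
      have e1 : (t - 1).toNat = a := by omega
      have e2 : g.toNat = b + 1 := by omega
      have e3 : t.toNat = a + 1 := by omega
      have e4 : (g - 1).toNat = b := by omega
      have hyv : (goA (t - 1) g m).1 = F a (b + 1) := by rw [hy.1, e1, e2]
      have hzv : (goA t (g - 1) (goA (t - 1) g m).2).1 = F (a + 1) b := by rw [hz.1, e3, e4]
      have key : F t.toNat g.toNat =
          (2 * (goA (t - 1) g m).1.1 * (goA t (g - 1) (goA (t - 1) g m).2).1.1,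
           (goA (t - 1) g m).1.1 * (goA t (g - 1) (goA (t - 1) g m).2).1.2 +
             (goA (t - 1) g m).1.2 * (goA t (g - 1) (goA (t - 1) g m).2).1.1) := by
        rw [e3, e2, F_succ_succ, hyv, hzv]
      constructor
      · show ((goA t (g - 1) (goA (t - 1) g m).2).2.insert (t, g) _).getD (t, g) (0, 0) = _
        rw [PySem.Dict.getD_insert_self, key]
      · intro t' g' v hv
        simp only [PySem.Dict.get?_insert] at hv
        by_cases hk : ((t', g') : Int × Int) = (t, g)
        · rw [if_pos hk] at hv
          obtain ⟨rfl, rfl⟩ : t' = t ∧ g' = g := Prod.mk.injEq .. ▸ Prod.ext_iff.mp hk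
          refine ⟨by omega, by omega, ?_⟩
          rw [← Option.some_inj.mp hv, key]
        · rw [if_neg hk] at hv
          exact hz.2 t' g' v hv
termination_by (t.toNat + g.toNat)
decreasing_by
  all_goals omega

lemma a_eq_F (t g : Int) (ht : 0 ≤ t) (hg : 0 ≤ g) :
    get_ev_2 t g = F t.toNat g.toNat := by
  have := goA_correct t g PySem.Dict.empty ht hg
    (by intro a b v hv; simp [PySem.Dict.get?_empty] at hv)
  simpa [get_ev_2] using this.1

lemma stepRowB_nat (t : Nat) (g : Int) (hg : 0 < g)
    (row : List (Int × Int)) (hrow : row = (List.range (g.toNat + 1)).map (fun j => F t j)) :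
    ∀ k : Nat, k ≤ g.toNat →
      stepRowB row (k : Int) = (List.range (k + 1)).map (fun j => F (t + 1) j) := by
  intro k
  induction k with
  | zero =>
    intro _
    simp [stepRowB, F_pos_zero (t + 1) (by omega)]
  | succ k ih =>
    intro hk
    have hcast : ((k + 1 : Nat) : Int) + 1 = (((k : Nat) : Int) + 1) + 1 := by push_cast; ring
    unfold stepRowB
    rw [hcast, PySem.List.pyRange_one_succ_right (by omega), List.foldl_append]
    have ihp : stepRowB row (k : Int) = (List.range (k + 1)).map (fun j => F (t + 1) j) :=
      ih (by omega)
    unfold stepRowB at ihp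
    rw [ihp]
    -- evaluate the one remaining iteration, with index gi = k + 1
    simp only [List.foldl_cons, List.foldl_nil]
    have hidx1 : ((k : Int) + 1) = ((k + 1 : Nat) : Int) := by push_cast; ring
    have hy : PySem.List.pyGetD row ((k : Int) + 1) (0, 0) = F t (k + 1) := by
      rw [hidx1, PySem.List.pyGetD_natCast, hrow]
      rw [List.getD_eq_getElem _ _ (by simp; omega)]
      simp
    have hz : PySem.List.pyGetD ((List.range (k + 1)).map (fun j => F (t + 1) j))
        ((k : Int) + 1 - 1) (0, 0) = F (t + 1) k := by
      have : ((k : Int) + 1 - 1) = ((k : Nat) : Int) := by ring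
      rw [this, PySem.List.pyGetD_natCast]
      rw [List.getD_eq_getElem _ _ (by simp)]
      simp
    rw [hy, hz]
    rw [List.range_succ (n := k + 1), List.map_append]
    simp [F_succ_succ]
lemma row0_eq (g : Int) (hg : 0 < g) :
    (PySem.List.pyRange 0 (g + 1) 1).map
        (fun j => ((if 0 ≤ j then (2 : Int) ^ j.toNat else 0), (1 : Int)))
      = (List.range (g.toNat + 1)).map (fun j => F 0 j) := by
  rw [PySem.List.pyRange_one, List.map_map]
  have hlen : (g + 1 - 0).toNat = g.toNat + 1 := by omega
  rw [hlen]
  apply List.map_congr_left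
  intro j hj
  simp only [Function.comp]
  rw [F_zero]
  simp

lemma rows_spec (t : Nat) (g : Int) (hg : 0 < g) :
    (List.range t).foldl (fun r _ => stepRowB r g)
        ((PySem.List.pyRange 0 (g + 1) 1).map
          (fun j => ((if 0 ≤ j then (2 : Int) ^ j.toNat else 0), (1 : Int))))
      = (List.range (g.toNat + 1)).map (fun j => F t j) := by
  induction t with
  | zero => simpa using row0_eq g hg
  | succ t ih =>
    rw [List.range_succ, List.foldl_append, ih]
    simp only [List.foldl_cons, List.foldl_nil]
    have h := stepRowB_nat t g hg _ rfl g.toNat (by omega)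
    rwa [show ((g.toNat : Nat) : Int) = g by omega] at h

lemma alt_eq_F (t g : Int) (ht : 0 < t) (hg : 0 < g) :
    get_ev_2_alt t g = F t.toNat g.toNat := by
  unfold get_ev_2_alt
  rw [if_neg (by omega), if_neg (by omega)]
  simp only []
  rw [rows_spec t.toNat g hg]
  have hgc : g = ((g.toNat : Nat) : Int) := by omega
  conv_lhs => rw [hgc, PySem.List.pyGetD_natCast]
  rw [List.getD_eq_getElem _ _ (by simp)]
  simp

-- ===== VERDICT (by name: the statement is the Claim_ definition above) =====
theorem get_ev_2_spec : Claim_equal_get_ev_2 := by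
  intro t g _ hpre
  unfold Spec_get_ev_2
  by_cases ht0 : t = 0
  · subst ht0
    rw [get_ev_2, goA.eq_def]
    simp [get_ev_2_alt]
  · by_cases hg0 : g = 0
    · subst hg0
      rw [get_ev_2, goA.eq_def]
      simp [ht0, get_ev_2_alt]
    · obtain ⟨ht, hg⟩ : 0 ≤ t ∧ 0 ≤ g := by
        rcases hpre with h | h
        · exact absurd h hg0
        · exact h
      rw [a_eq_F t g ht hg, alt_eq_F t g (by omega) (by omega)]
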